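-- pv_equiv track=rewrite | github.com/pomology-ku/cell_div_det | train.py | make_sweep_combinations
-- ===== SOURCE A (Python) =====
-- from itertools import product
--
-- def make_sweep_combinations(train_hp: dict):
--     """
--     train_hp 内のリスト/タプルを全てスイープ軸にする。
--     例) {"imgsz":[1024,1280], "epochs":150} -> [{"imgsz":1024}, {"imgsz":1280}]
--     複数キーがリストなら直積。
--     """
--     sweep_keys, sweep_vals = [], []
--     for k, v in train_hp.items():
--         if isinstance(v, (list, tuple)) and len(v) > 0:
--             sweep_keys.append(k)
--             sweep_vals.append(list(v))
--     if not sweep_keys: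
--         return [dict()]  # スイープ無し
--     combos = []
--     for values in product(*sweep_vals):
--         combos.append({k: v for k, v in zip(sweep_keys, values)})
--     return combos
-- ===== SOURCE B (Python) =====
-- def make_sweep_combinations(train_hp: dict):
--     """Iterative fold: expand one sweep axis at a time instead of itertools.product."""
--     combos = [dict()]
--     for k, v in train_hp.items():
--         if isinstance(v, (list, tuple)) and len(v) > 0:
--             combos = [{**c, k: val} for c in combos for val in v]
--     return combos
-- ===== Notes on version B (the rewrite author's own statement) =====
-- stated objective: alternative
-- what changed: Replaces the collect-axes-then-itertools.product pipeline with a single fold that expands a running list of partial dicts one axis at a time (inner loop over values, so the last axis varies fastest); the no-sweep case needs no special branch because the running list starts as a single empty dict.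
import Mathlib
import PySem

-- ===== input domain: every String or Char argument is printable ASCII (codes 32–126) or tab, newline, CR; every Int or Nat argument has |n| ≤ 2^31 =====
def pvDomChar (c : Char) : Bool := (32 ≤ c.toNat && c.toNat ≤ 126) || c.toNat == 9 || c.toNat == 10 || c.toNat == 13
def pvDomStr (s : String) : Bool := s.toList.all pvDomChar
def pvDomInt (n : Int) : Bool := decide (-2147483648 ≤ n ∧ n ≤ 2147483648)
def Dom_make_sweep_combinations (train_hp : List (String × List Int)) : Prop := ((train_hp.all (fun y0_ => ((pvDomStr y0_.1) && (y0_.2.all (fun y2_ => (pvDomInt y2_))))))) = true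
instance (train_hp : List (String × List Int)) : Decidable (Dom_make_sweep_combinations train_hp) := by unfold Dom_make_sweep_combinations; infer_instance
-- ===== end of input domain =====

-- ===== PORT A =====
-- Header: B replaces collect-axes + itertools.product with a single fold expanding partial combos one axis at a time (alternative decomposition, same cost).
-- Both ports represent Python dicts as association lists in insertion order (keys of a Python dict are distinct).

-- itertools.product over the collected value lists (last axis varies fastest)
def pyProductA : List (List Int) → List (List Int)
  | [] => [[]]
  | vs :: rest => vs.flatMap (fun v => (pyProductA rest).map (fun tail => v :: tail))

def make_sweep_combinations (train_hp : List (String × List Int)) : List (List (String × Int)) :=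
  let acc := train_hp.foldl
    (fun (acc : List String × List (List Int)) kv =>
      if kv.2.length > 0 then (acc.1 ++ [kv.1], acc.2 ++ [kv.2]) else acc)
    ([], [])
  if acc.1 = [] then [[]]
  else (pyProductA acc.2).map (fun values => acc.1.zip values)

-- ===== PORT B =====
def make_sweep_combinations_alt (train_hp : List (String × List Int)) : List (List (String × Int)) :=
  train_hp.foldl
    (fun combos kv =>
      if kv.2.length > 0 then
        combos.flatMap (fun c => kv.2.map (fun v => c ++ [(kv.1, v)]))
      else combos)
    [[]]

-- ===== PRECONDITION & SPEC =====
def Spec_make_sweep_combinations (train_hp : List (String × List Int)) (out : List (List (String × Int))) : Prop := out = make_sweep_combinations_alt train_hp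
instance (train_hp : List (String × List Int)) (out : List (List (String × Int))) : Decidable (Spec_make_sweep_combinations train_hp out) := by unfold Spec_make_sweep_combinations; infer_instance

-- ===== CLAIM (what is proved, stated in full; the proofs are below) =====
def Claim_equal_make_sweep_combinations : Prop := ∀ (train_hp : List (String × List Int)), Dom_make_sweep_combinations train_hp → Spec_make_sweep_combinations train_hp (make_sweep_combinations train_hp)

-- ===== LEMMAS AND PROOFS =====

-- tailsH t = the combinations contributed by the remaining axes t (suffix products)
def tailsH : List (String × List Int) → List (List (String × Int))
  | [] => [[]]
  | kv :: rest =>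
      if kv.2.length > 0 then
        kv.2.flatMap (fun v => (tailsH rest).map (fun tl => (kv.1, v) :: tl))
      else tailsH rest

theorem alt_foldl_eq (t : List (String × List Int)) (combos : List (List (String × Int))) :
    t.foldl
      (fun combos kv =>
        if kv.2.length > 0 then
          combos.flatMap (fun c => kv.2.map (fun v => c ++ [(kv.1, v)]))
        else combos)
      combos
    = combos.flatMap (fun c => (tailsH t).map (fun tl => c ++ tl)) := by
  induction t generalizing combos with
  | nil => simp [tailsH]
  | cons kv rest ih =>
      by_cases h : kv.2.length > 0
      · simp only [List.foldl_cons, ih, tailsH, if_pos h]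
        simp [List.flatMap_map, List.map_flatMap, List.map_map, List.flatMap_assoc, Function.comp_def]
      · simp only [List.foldl_cons, ih, tailsH, if_neg h]

theorem accA_eq (t : List (String × List Int)) (ks : List String) (vs : List (List Int)) :
    t.foldl
      (fun (acc : List String × List (List Int)) kv =>
        if kv.2.length > 0 then (acc.1 ++ [kv.1], acc.2 ++ [kv.2]) else acc)
      (ks, vs)
    = (ks ++ (t.filter (fun kv => kv.2.length > 0)).map Prod.fst,
       vs ++ (t.filter (fun kv => kv.2.length > 0)).map Prod.snd) := by
  induction t generalizing ks vs with
  | nil => simp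
  | cons kv rest ih =>
      by_cases h : kv.2.length > 0
      · simp [List.filter_cons, h, ih]
      · simp [List.filter_cons, h, ih]

theorem zip_prod_eq_tails (t : List (String × List Int)) :
    (pyProductA ((t.filter (fun kv => kv.2.length > 0)).map Prod.snd)).map
      (fun values => ((t.filter (fun kv => kv.2.length > 0)).map Prod.fst).zip values)
    = tailsH t := by
  induction t with
  | nil => simp [pyProductA, tailsH]
  | cons kv rest ih =>
      by_cases h : kv.2.length > 0
      · simp only [List.filter_cons, h, decide_true, List.map_cons, tailsH, if_pos h]
        rw [← ih]
        simp [pyProductA, List.map_flatMap, List.map_map, Function.comp_def]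
      · simp only [List.filter_cons, h]
        simpa [tailsH, h] using ih

theorem tails_of_no_sweep (t : List (String × List Int))
    (h : (t.filter (fun kv => kv.2.length > 0)) = []) : tailsH t = [[]] := by
  induction t with
  | nil => rfl
  | cons kv rest ih =>
      by_cases hk : kv.2.length > 0
      · rw [List.filter_cons, if_pos (by simpa using hk)] at h
        exact absurd h (by simp)
      · rw [List.filter_cons, if_neg (by simpa using hk)] at h
        simp [tailsH, hk, ih h]

-- ===== VERDICT (by name: the statement is the Claim_ definition above) =====
theorem make_sweep_combinations_spec : Claim_equal_make_sweep_combinations := by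
  intro t _
  unfold Spec_make_sweep_combinations make_sweep_combinations make_sweep_combinations_alt
  rw [alt_foldl_eq, accA_eq]
  simp only [List.nil_append, List.flatMap_cons, List.flatMap_nil, List.append_nil,
    List.nil_append]
  by_cases h : (t.filter (fun kv => kv.2.length > 0)).map Prod.fst = []
  · have hf : t.filter (fun kv => kv.2.length > 0) = [] := by
      cases hfe : t.filter (fun kv => kv.2.length > 0) with
      | nil => rfl
      | cons a l => rw [hfe] at h; simp at h
    rw [if_pos h, tails_of_no_sweep t hf]
    simp
  · rw [if_neg h, zip_prod_eq_tails]
    simp
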